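-- pv_equiv track=rewrite | github.com/ParkerCase/stylist | services/recommendation_service.py | are_colors_compatible
-- ===== SOURCE A (Python) =====
-- from typing import Dict, List, Set, Tuple, Optional
--
-- def are_colors_compatible(colors1: List[str], colors2: List[str]) -> bool:
--     """
--     Check if two sets of colors are compatible for an outfit.
--     """
--     # Convert to lowercase
--     colors1 = [c.lower() for c in colors1]
--     colors2 = [c.lower() for c in colors2]
--
--     # Define color compatibility groups
--     neutral_colors = ["black", "white", "gray", "beige", "tan", "cream", "navy"]
--
--     # If either contains neutral colors, they're compatible
--     if any(color in neutral_colors for color in colors1) or any(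
--         color in neutral_colors for color in colors2
--     ):
--         return True
--
--     # Define complementary color pairs
--     complementary_pairs = [
--         ({"blue"}, {"orange", "brown"}),
--         ({"red"}, {"green"}),
--         ({"yellow"}, {"purple"}),
--         ({"pink"}, {"olive", "green"}),
--     ]
--
--     # Check for complementary colors
--     for group1, group2 in complementary_pairs:
--         if (
--             any(color in group1 for color in colors1)
--             and any(color in group2 for color in colors2)
--         ) or (
--             any(color in group2 for color in colors1)
--             and any(color in group1 for color in colors2)
--         ):
--             return True
--
--     # Check for monochromatic (same color family)
--     color_families = {
--         "blue": ["lightblue", "navy", "skyblue", "teal", "cyan"],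
--         "red": ["maroon", "crimson", "burgundy", "pink"],
--         "green": ["olive", "lime", "forest", "mint", "emerald"],
--         "purple": ["lavender", "violet", "plum", "mauve"],
--         "yellow": ["gold", "mustard", "amber"],
--         "orange": ["peach", "coral", "salmon"],
--         "brown": ["tan", "beige", "khaki", "camel"],
--         "gray": ["silver", "charcoal"],
--     }
--
--     # Check if colors belong to the same family
--     for family, variations in color_families.items():
--         family_set = {family} | set(variations)
--         if any(color in family_set for color in colors1) and any(
--             color in family_set for color in colors2
--         ):
--             return True
--
--     # Default: assume not compatible
--     return False
-- ===== SOURCE B (Python) =====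
-- # Idiomatic re-implementation: set intersections + a single color->family dict
-- # replace A's repeated membership scans over family lists.
--
-- _NEUTRALS = frozenset(["black", "white", "gray", "beige", "tan", "cream", "navy"])
--
-- _COMPLEMENTARY = [
--     (frozenset(["blue"]), frozenset(["orange", "brown"])),
--     (frozenset(["red"]), frozenset(["green"])),
--     (frozenset(["yellow"]), frozenset(["purple"])),
--     (frozenset(["pink"]), frozenset(["olive", "green"])),
-- ]
--
-- # Each color variant (and each family head) maps to its unique family name.
-- _FAMILY_OF = {
--     "blue": "blue", "lightblue": "blue", "navy": "blue", "skyblue": "blue",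
--     "teal": "blue", "cyan": "blue",
--     "red": "red", "maroon": "red", "crimson": "red", "burgundy": "red", "pink": "red",
--     "green": "green", "olive": "green", "lime": "green", "forest": "green",
--     "mint": "green", "emerald": "green",
--     "purple": "purple", "lavender": "purple", "violet": "purple", "plum": "purple",
--     "mauve": "purple",
--     "yellow": "yellow", "gold": "yellow", "mustard": "yellow", "amber": "yellow",
--     "orange": "orange", "peach": "orange", "coral": "orange", "salmon": "orange",
--     "brown": "brown", "tan": "brown", "beige": "brown", "khaki": "brown", "camel": "brown",
--     "gray": "gray", "silver": "gray", "charcoal": "gray",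
-- }
--
--
-- def are_colors_compatible(colors1, colors2):
--     s1 = {c.lower() for c in colors1}
--     s2 = {c.lower() for c in colors2}
--
--     if (s1 & _NEUTRALS) or (s2 & _NEUTRALS):
--         return True
--
--     for g1, g2 in _COMPLEMENTARY:
--         if ((g1 & s1) and (g2 & s2)) or ((g2 & s1) and (g1 & s2)):
--             return True
--
--     f1 = {_FAMILY_OF[c] for c in s1 if c in _FAMILY_OF}
--     f2 = {_FAMILY_OF[c] for c in s2 if c in _FAMILY_OF}
--     return not f1.isdisjoint(f2)
-- ===== Notes on version B (the rewrite author's own statement) =====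
-- stated objective: idiomatic
-- what changed: Replaces A's nested per-family membership scans with set intersections and a single color->family dict built once, so the family check becomes one dict lookup per color plus a set-disjointness test.
import Mathlib
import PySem

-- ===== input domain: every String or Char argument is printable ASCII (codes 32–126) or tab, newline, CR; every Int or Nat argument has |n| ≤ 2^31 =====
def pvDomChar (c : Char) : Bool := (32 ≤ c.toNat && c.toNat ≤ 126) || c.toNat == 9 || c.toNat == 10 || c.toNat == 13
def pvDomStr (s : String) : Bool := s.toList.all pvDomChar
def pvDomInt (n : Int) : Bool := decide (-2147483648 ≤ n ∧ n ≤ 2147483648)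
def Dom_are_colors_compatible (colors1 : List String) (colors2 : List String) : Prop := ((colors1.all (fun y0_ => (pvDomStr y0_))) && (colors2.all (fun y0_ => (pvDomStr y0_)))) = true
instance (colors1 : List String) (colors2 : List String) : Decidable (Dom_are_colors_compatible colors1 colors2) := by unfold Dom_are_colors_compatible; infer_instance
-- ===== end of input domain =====

-- B replaces A's per-family membership scans by set intersections and one color->family dict (idiomatic; same cost).

-- ===== PORT A =====
def aNeutrals : List String := ["black", "white", "gray", "beige", "tan", "cream", "navy"]

def aCompPairs : List (PySem.Set String × PySem.Set String) :=
  [ (PySem.Set.ofList ["blue"], PySem.Set.ofList ["orange", "brown"]),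
    (PySem.Set.ofList ["red"], PySem.Set.ofList ["green"]),
    (PySem.Set.ofList ["yellow"], PySem.Set.ofList ["purple"]),
    (PySem.Set.ofList ["pink"], PySem.Set.ofList ["olive", "green"]) ]

def aFamilies : List (String × List String) :=
  [ ("blue", ["lightblue", "navy", "skyblue", "teal", "cyan"]),
    ("red", ["maroon", "crimson", "burgundy", "pink"]),
    ("green", ["olive", "lime", "forest", "mint", "emerald"]),
    ("purple", ["lavender", "violet", "plum", "mauve"]),
    ("yellow", ["gold", "mustard", "amber"]),
    ("orange", ["peach", "coral", "salmon"]),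
    ("brown", ["tan", "beige", "khaki", "camel"]),
    ("gray", ["silver", "charcoal"]) ]

def are_colors_compatible (colors1 : List String) (colors2 : List String) : Bool :=
  let c1 := colors1.map PySem.Str.lower
  let c2 := colors2.map PySem.Str.lower
  if c1.any (fun color => aNeutrals.contains color) || c2.any (fun color => aNeutrals.contains color) then
    true
  else if aCompPairs.any (fun p =>
      (c1.any (fun color => PySem.Set.contains p.1 color) && c2.any (fun color => PySem.Set.contains p.2 color)) ||
      (c1.any (fun color => PySem.Set.contains p.2 color) && c2.any (fun color => PySem.Set.contains p.1 color))) then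
    true
  else if aFamilies.any (fun p =>
      (c1.any (fun color => PySem.Set.contains (PySem.Set.union (PySem.Set.ofList [p.1]) (PySem.Set.ofList p.2)) color)) &&
      (c2.any (fun color => PySem.Set.contains (PySem.Set.union (PySem.Set.ofList [p.1]) (PySem.Set.ofList p.2)) color))) then
    true
  else
    false

-- ===== PORT B =====
def altNeutrals : PySem.Set String :=
  PySem.Set.ofList ["black", "white", "gray", "beige", "tan", "cream", "navy"]

def altComplementary : List (PySem.Set String × PySem.Set String) :=
  [ (PySem.Set.ofList ["blue"], PySem.Set.ofList ["orange", "brown"]),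
    (PySem.Set.ofList ["red"], PySem.Set.ofList ["green"]),
    (PySem.Set.ofList ["yellow"], PySem.Set.ofList ["purple"]),
    (PySem.Set.ofList ["pink"], PySem.Set.ofList ["olive", "green"]) ]

def altFamilyOf : PySem.Dict String String :=
  PySem.Dict.ofList
    [ ("blue", "blue"), ("lightblue", "blue"), ("navy", "blue"), ("skyblue", "blue"),
      ("teal", "blue"), ("cyan", "blue"),
      ("red", "red"), ("maroon", "red"), ("crimson", "red"), ("burgundy", "red"), ("pink", "red"),
      ("green", "green"), ("olive", "green"), ("lime", "green"), ("forest", "green"),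
      ("mint", "green"), ("emerald", "green"),
      ("purple", "purple"), ("lavender", "purple"), ("violet", "purple"), ("plum", "purple"),
      ("mauve", "purple"),
      ("yellow", "yellow"), ("gold", "yellow"), ("mustard", "yellow"), ("amber", "yellow"),
      ("orange", "orange"), ("peach", "orange"), ("coral", "orange"), ("salmon", "orange"),
      ("brown", "brown"), ("tan", "brown"), ("beige", "brown"), ("khaki", "brown"), ("camel", "brown"),
      ("gray", "gray"), ("silver", "gray"), ("charcoal", "gray") ]

-- {_FAMILY_OF[c] for c in s if c in _FAMILY_OF}
def altFamilies (s : PySem.Set String) : PySem.Set String :=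
  PySem.Set.ofList (s.filterMap (fun c => altFamilyOf.get? c))

def are_colors_compatible_alt (colors1 : List String) (colors2 : List String) : Bool :=
  let s1 : PySem.Set String := PySem.Set.ofList (colors1.map PySem.Str.lower)
  let s2 : PySem.Set String := PySem.Set.ofList (colors2.map PySem.Str.lower)
  if !(PySem.Set.inter s1 altNeutrals).isEmpty || !(PySem.Set.inter s2 altNeutrals).isEmpty then
    true
  else if altComplementary.any (fun p =>
      (!(PySem.Set.inter p.1 s1).isEmpty && !(PySem.Set.inter p.2 s2).isEmpty) ||
      (!(PySem.Set.inter p.2 s1).isEmpty && !(PySem.Set.inter p.1 s2).isEmpty)) then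
    true
  else
    !(PySem.Set.isdisjoint (altFamilies s1) (altFamilies s2))

-- ===== PRECONDITION & SPEC =====
def Spec_are_colors_compatible (colors1 : List String) (colors2 : List String) (out : Bool) : Prop := out = are_colors_compatible_alt colors1 colors2
instance (colors1 : List String) (colors2 : List String) (out : Bool) : Decidable (Spec_are_colors_compatible colors1 colors2 out) := by unfold Spec_are_colors_compatible; infer_instance

-- ===== CLAIM (what is proved, stated in full; the proofs are below) =====
def Claim_equal_are_colors_compatible : Prop := ∀ (colors1 : List String) (colors2 : List String), Dom_are_colors_compatible colors1 colors2 → Spec_are_colors_compatible colors1 colors2 (are_colors_compatible colors1 colors2)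

-- ===== LEMMAS AND PROOFS =====

-- 'any(color in g for color in l)' equals 'set(l) & set(g) is non-empty'
lemma any_listContains_eq_inter (l g : List String) :
    (l.any (fun c => g.contains c)) =
      !((PySem.Set.inter (PySem.Set.ofList l) (PySem.Set.ofList g)).isEmpty) := by
  rw [Bool.eq_iff_iff]
  simp [List.any_eq_true, PySem.Set.mem_ofList, List.eq_nil_iff_forall_not_mem, PySem.Set.inter]

-- same, with the set on the left of the intersection
lemma any_setContains_eq_inter (l : List String) (s : PySem.Set String) :
    (l.any (fun c => PySem.Set.contains s c)) =
      !((PySem.Set.inter s (PySem.Set.ofList l)).isEmpty) := by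
  rw [Bool.eq_iff_iff]
  simp [List.any_eq_true, PySem.Set.mem_ofList, List.eq_nil_iff_forall_not_mem, PySem.Set.inter]
  tauto

-- every key of B's dict lies in the A-family set named by its value
lemma fam_forward (c f : String) (h : altFamilyOf.get? c = some f) :
    ∃ q ∈ aFamilies, f = q.1 ∧ c ∈ (PySem.Set.union (PySem.Set.ofList [q.1]) (PySem.Set.ofList q.2) : List String) := by
  have hm := PySem.Dict.mem_items_of_get?_eq_some altFamilyOf h
  have H : ∀ p ∈ altFamilyOf.items, ∃ q ∈ aFamilies, p.2 = q.1 ∧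
      (PySem.Set.contains (PySem.Set.union (PySem.Set.ofList [q.1]) (PySem.Set.ofList q.2)) p.1 = true) := by
    set_option maxRecDepth 8192 in decide
  obtain ⟨q, hq, h1, h2⟩ := H _ hm
  exact ⟨q, hq, h1, (PySem.Set.contains_iff _ _).mp h2⟩

-- every member of an A-family set is a key of B's dict, mapped to the family head
lemma fam_backward : ∀ q ∈ aFamilies, ∀ c ∈ (PySem.Set.union (PySem.Set.ofList [q.1]) (PySem.Set.ofList q.2) : List String),
    altFamilyOf.get? c = some q.1 := by
  set_option maxRecDepth 8192 in decide

-- family heads are pairwise distinct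
lemma fam_unique : ∀ q ∈ aFamilies, ∀ q' ∈ aFamilies, q.1 = q'.1 → q = q' := by decide

lemma family_eq (l1 l2 : List String) :
    (aFamilies.any (fun p =>
      (l1.any (fun color => PySem.Set.contains (PySem.Set.union (PySem.Set.ofList [p.1]) (PySem.Set.ofList p.2)) color)) &&
      (l2.any (fun color => PySem.Set.contains (PySem.Set.union (PySem.Set.ofList [p.1]) (PySem.Set.ofList p.2)) color)))) =
    !(PySem.Set.isdisjoint (altFamilies (PySem.Set.ofList l1)) (altFamilies (PySem.Set.ofList l2))) := by
  rw [Bool.eq_iff_iff]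
  simp only [List.any_eq_true, Bool.and_eq_true, Bool.not_eq_true', PySem.Set.contains_iff,
    altFamilies, Bool.eq_false_iff, Ne, PySem.Set.isdisjoint_iff]
  constructor
  · rintro ⟨p, hp, ⟨c1, hc1, hm1⟩, ⟨c2, hc2, hm2⟩⟩ hdisj
    have g1 : altFamilyOf.get? c1 = some p.1 := fam_backward p hp c1 hm1
    have g2 : altFamilyOf.get? c2 = some p.1 := fam_backward p hp c2 hm2
    refine hdisj p.1 ?_ ?_
    · exact (PySem.Set.mem_ofList _ _).mpr (List.mem_filterMap.mpr ⟨c1, (PySem.Set.mem_ofList _ _).mpr hc1, g1⟩)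
    · exact (PySem.Set.mem_ofList _ _).mpr (List.mem_filterMap.mpr ⟨c2, (PySem.Set.mem_ofList _ _).mpr hc2, g2⟩)
  · intro h
    rcases not_forall.mp h with ⟨f, hf⟩
    rcases Classical.not_imp.mp hf with ⟨hf1, hf2⟩
    rw [not_not] at hf2
    obtain ⟨c1, hc1s, g1⟩ := List.mem_filterMap.mp ((PySem.Set.mem_ofList _ _).mp hf1)
    obtain ⟨c2, hc2s, g2⟩ := List.mem_filterMap.mp ((PySem.Set.mem_ofList _ _).mp hf2)
    obtain ⟨q, hq, hfq, hm1⟩ := fam_forward c1 f g1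
    obtain ⟨q', hq', hfq', hm2⟩ := fam_forward c2 f g2
    have : q = q' := fam_unique q hq q' hq' (hfq ▸ hfq' ▸ rfl)
    subst this
    exact ⟨q, hq, ⟨c1, (PySem.Set.mem_ofList _ _).mp hc1s, hm1⟩, ⟨c2, (PySem.Set.mem_ofList _ _).mp hc2s, hm2⟩⟩

-- ===== VERDICT (by name: the statement is the Claim_ definition above) =====
theorem are_colors_compatible_spec : Claim_equal_are_colors_compatible := by
  intro colors1 colors2 _
  unfold Spec_are_colors_compatible are_colors_compatible are_colors_compatible_alt
  simp only [family_eq]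
  simp only [any_listContains_eq_inter, any_setContains_eq_inter,
    aNeutrals, altNeutrals, aCompPairs, altComplementary]
  split_ifs <;> simp_all
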